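-- pv_equiv track=rewrite | github.com/zarudesu/tg-modern-bot | app/modules/plane_assistant/handlers.py | _find_project
-- ===== SOURCE A (Python) =====
-- def _find_project(projects: list, ident: str) -> dict | None:
--     """Find project by identifier/name (exact then substring)."""
--     ident_upper = ident.upper()
--     # Exact match on identifier or name
--     for p in projects:
--         if ident_upper in (p.get('identifier', '').upper(), p.get('name', '').upper()):
--             return p
--     # Substring match
--     for p in projects:
--         if ident_upper in p.get('name', '').upper() or ident_upper in p.get('identifier', '').upper():
--             return p
--     return None
-- ===== SOURCE B (Python) =====
-- def _find_project(projects: list, ident: str) -> dict | None: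
--     """Find project by identifier/name (exact then substring), single pass."""
--     ident_upper = ident.upper()
--     candidate = None
--     for p in projects:
--         id_u = p.get('identifier', '').upper()
--         name_u = p.get('name', '').upper()
--         if ident_upper == id_u or ident_upper == name_u:
--             return p
--         if candidate is None and (ident_upper in name_u or ident_upper in id_u):
--             candidate = p
--     return candidate
-- ===== Notes on version B (the rewrite author's own statement) =====
-- stated objective: alternative
-- what changed: Replaces A's two sequential scans (exact pass, then substring pass) with one single pass that returns exact matches immediately and records the first substring match as a fallback candidate.
import Mathlib
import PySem

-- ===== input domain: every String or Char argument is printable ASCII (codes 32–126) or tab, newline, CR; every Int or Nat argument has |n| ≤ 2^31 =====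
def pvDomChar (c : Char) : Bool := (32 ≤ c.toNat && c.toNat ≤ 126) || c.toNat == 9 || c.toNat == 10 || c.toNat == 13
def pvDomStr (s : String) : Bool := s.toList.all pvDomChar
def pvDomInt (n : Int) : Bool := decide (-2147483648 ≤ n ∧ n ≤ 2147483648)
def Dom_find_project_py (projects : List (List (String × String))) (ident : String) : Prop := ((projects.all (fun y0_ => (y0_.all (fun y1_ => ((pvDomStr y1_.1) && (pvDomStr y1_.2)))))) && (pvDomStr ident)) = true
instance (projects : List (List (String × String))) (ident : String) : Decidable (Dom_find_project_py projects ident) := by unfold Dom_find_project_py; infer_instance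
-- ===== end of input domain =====

-- B replaces A's two sequential scans with one pass (exact match returns at once,
-- first substring match is kept as a fallback candidate); same cost, different decomposition.

-- ===== PORT A =====
-- p.get('identifier','').upper()
def pvIdU (p : List (String × String)) : String :=
  PySem.Str.upper (PySem.Dict.getD (PySem.Dict.mk p) "identifier" "")

def pvNameU (p : List (String × String)) : String :=
  PySem.Str.upper (PySem.Dict.getD (PySem.Dict.mk p) "name" "")

-- first loop of A: exact match on identifier or name
def pvExactLoop (iu : String) : List (List (String × String)) → Option (List (String × String))
  | [] => none
  | p :: rest =>
      if iu == pvIdU p || iu == pvNameU p then some p else pvExactLoop iu rest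

-- second loop of A: substring match
def pvSubLoop (iu : String) : List (List (String × String)) → Option (List (String × String))
  | [] => none
  | p :: rest =>
      if PySem.Str.isIn iu (pvNameU p) || PySem.Str.isIn iu (pvIdU p) then some p
      else pvSubLoop iu rest

def find_project_py (projects : List (List (String × String))) (ident : String) : Option (List (String × String)) :=
  let ident_upper := PySem.Str.upper ident
  match pvExactLoop ident_upper projects with
  | some p => some p
  | none => pvSubLoop ident_upper projects

-- ===== PORT B =====
-- single pass with a fallback candidate accumulator
def pvOneLoop (iu : String) : List (List (String × String)) → Option (List (String × String)) → Option (List (String × String))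
  | [], cand => cand
  | p :: rest, cand =>
      let id_u := pvIdU p
      let name_u := pvNameU p
      if iu == id_u || iu == name_u then some p
      else
        pvOneLoop iu rest
          (if cand.isNone && (PySem.Str.isIn iu name_u || PySem.Str.isIn iu id_u) then some p else cand)

def find_project_py_alt (projects : List (List (String × String))) (ident : String) : Option (List (String × String)) :=
  pvOneLoop (PySem.Str.upper ident) projects none

-- ===== PRECONDITION & SPEC =====
def Spec_find_project_py (projects : List (List (String × String))) (ident : String) (out : Option (List (String × String))) : Prop := out = find_project_py_alt projects ident
instance (projects : List (List (String × String))) (ident : String) (out : Option (List (String × String))) : Decidable (Spec_find_project_py projects ident out) := by unfold Spec_find_project_py; infer_instance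

-- ===== CLAIM (what is proved, stated in full; the proofs are below) =====
def Claim_equal_find_project_py : Prop := ∀ (projects : List (List (String × String))) (ident : String), Dom_find_project_py projects ident → Spec_find_project_py projects ident (find_project_py projects ident)

-- ===== LEMMAS AND PROOFS =====

-- Invariant of B's single loop: it equals A's exact pass, falling back to the
-- stored candidate (if any), and only then to A's substring pass.
theorem pvOneLoop_eq (iu : String) (l : List (List (String × String)))
    (cand : Option (List (String × String))) :
    pvOneLoop iu l cand =
      match pvExactLoop iu l with
      | some p => some p
      | none => match cand with
                | some c => some c
                | none => pvSubLoop iu l := by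
  induction l generalizing cand with
  | nil => cases cand <;> simp [pvOneLoop, pvExactLoop, pvSubLoop]
  | cons p rest ih =>
      by_cases hex : (iu == pvIdU p || iu == pvNameU p) = true
      · simp [pvOneLoop, pvExactLoop, hex]
      · rw [show pvOneLoop iu (p :: rest) cand = pvOneLoop iu rest
              (if cand.isNone && (PySem.Str.isIn iu (pvNameU p) || PySem.Str.isIn iu (pvIdU p))
               then some p else cand) by simp [pvOneLoop, hex]]
        rw [ih]
        cases cand with
        | some c => simp [pvExactLoop, hex]
        | none =>
            simp only [pvExactLoop, pvSubLoop, if_neg hex]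
            by_cases hsub : (PySem.Str.isIn iu (pvNameU p) || PySem.Str.isIn iu (pvIdU p)) = true
            · have h' : PySem.Chars.isIn iu.toList (pvNameU p).toList = true ∨
                  PySem.Chars.isIn iu.toList (pvIdU p).toList = true := by simpa using hsub
              cases pvExactLoop iu rest <;> simp [h']
            · have h' : ¬(PySem.Chars.isIn iu.toList (pvNameU p).toList = true ∨
                  PySem.Chars.isIn iu.toList (pvIdU p).toList = true) := by simpa using hsub
              cases pvExactLoop iu rest <;> simp [h']

-- ===== VERDICT (by name: the statement is the Claim_ definition above) =====
theorem find_project_py_spec : Claim_equal_find_project_py := by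
  intro projects ident _
  unfold Spec_find_project_py find_project_py find_project_py_alt
  rw [pvOneLoop_eq]
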